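-- pv_equiv track=rewrite | github.com/5uw1st/tc-validate | tc_validate/crypto.py | _encode_four_chars
-- ===== SOURCE A (Python) =====
-- def _encode_four_chars(n):
--     _ret = ""
--     for i in range(4):
--         c = i * 8
--         cv = n >> c
--         _r = cv & 255
--         _ret += chr(_r)
--     return _ret
-- ===== SOURCE B (Python) =====
-- def _encode_four_chars(n):
--     return (n & 0xFFFFFFFF).to_bytes(4, 'little').decode('latin-1')
-- ===== Notes on version B (the rewrite author's own statement) =====
-- stated objective: idiomatic
-- what changed: The per-byte shift/mask loop with string concatenation is replaced by one bulk conversion: mask to 32 bits, emit the 4 little-endian bytes with int.to_bytes, and decode them via latin-1.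
import Mathlib
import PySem

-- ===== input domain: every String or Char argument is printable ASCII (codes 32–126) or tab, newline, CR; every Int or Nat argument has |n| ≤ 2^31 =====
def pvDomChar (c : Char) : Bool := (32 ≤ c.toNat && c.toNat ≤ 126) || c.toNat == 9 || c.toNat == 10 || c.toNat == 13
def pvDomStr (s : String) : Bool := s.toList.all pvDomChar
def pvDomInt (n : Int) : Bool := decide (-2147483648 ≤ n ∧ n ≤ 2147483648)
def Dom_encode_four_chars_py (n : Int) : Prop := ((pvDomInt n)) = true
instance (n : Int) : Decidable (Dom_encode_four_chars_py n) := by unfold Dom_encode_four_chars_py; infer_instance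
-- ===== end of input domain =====

-- B replaces A's per-byte shift/mask loop by one bulk conversion: mask to 32 bits,
-- take the 4 little-endian bytes at once, decode them latin-1 (objective: idiomatic).

-- ===== PORT A =====
def encode_four_chars_py (n : Int) : String :=
  (PySem.List.pyRange 0 4 1).foldl
    (fun (ret : String) (i : Int) =>
      let c := i * 8
      let cv := n >>> c.toNat            -- Python `n >> c` is Lean's `>>>` (c = i*8 ≥ 0 here)
      let r := PySem.Int.band cv 255     -- cv & 255
      ret.push (Char.ofNat r.toNat))     -- _ret += chr(_r); 0 ≤ _r ≤ 255 always, so chr never raises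
    ""

-- ===== PORT B =====
-- m.to_bytes(4, 'little') on 0 ≤ m < 2^32: the 4 little-endian base-256 digits of m
def pvBytesLE : Nat → Int → List Int
  | 0, _ => []
  | k+1, m => PySem.Int.mod m 256 :: pvBytesLE k (PySem.Int.floordiv m 256)

def encode_four_chars_py_alt (n : Int) : String :=
  let m := PySem.Int.band n 4294967295                               -- n & 0xFFFFFFFF
  String.ofList ((pvBytesLE 4 m).map (fun b => Char.ofNat b.toNat))  -- .decode('latin-1'): byte k ↦ U+00k

-- ===== PRECONDITION & SPEC =====
def Spec_encode_four_chars_py (n : Int) (out : String) : Prop := out = encode_four_chars_py_alt n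
instance (n : Int) (out : String) : Decidable (Spec_encode_four_chars_py n out) := by unfold Spec_encode_four_chars_py; infer_instance

-- ===== CLAIM (what is proved, stated in full; the proofs are below) =====
def Claim_equal_encode_four_chars_py : Prop := ∀ (n : Int), Dom_encode_four_chars_py n → Spec_encode_four_chars_py n (encode_four_chars_py n)

-- ===== LEMMAS AND PROOFS =====

-- masking with 2^8 - 1 is the Python (nonnegative) remainder mod 2^8, for every integer
theorem pv_band_255 (a : Int) : PySem.Int.band a 255 = a % 256 := by
  unfold PySem.Int.band
  norm_num
  split_ifs with h
  · have hnat := Nat.and_two_pow_sub_one_eq_mod a.toNat 8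
    norm_num at hnat
    rw [show Int.toNat 255 = 255 from rfl, hnat]; omega
  · have hnat := Nat.and_two_pow_sub_one_eq_mod (-a - 1).toNat 8
    norm_num at hnat
    rw [show Int.toNat 255 = 255 from rfl, Nat.and_comm, hnat]; omega

-- masking with 2^32 - 1 is the remainder mod 2^32, for every integer
theorem pv_band_mask32 (a : Int) : PySem.Int.band a 4294967295 = a % 4294967296 := by
  unfold PySem.Int.band
  norm_num
  split_ifs with h
  · have hnat := Nat.and_two_pow_sub_one_eq_mod a.toNat 32
    norm_num at hnat
    rw [show Int.toNat 4294967295 = 4294967295 from rfl, hnat]; omega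
  · have hnat := Nat.and_two_pow_sub_one_eq_mod (-a - 1).toNat 32
    norm_num at hnat
    rw [show Int.toNat 4294967295 = 4294967295 from rfl, Nat.and_comm, hnat]; omega

-- ===== VERDICT (by name: the statement is the Claim_ definition above) =====
theorem encode_four_chars_py_spec : Claim_equal_encode_four_chars_py := by
  intro n _
  show encode_four_chars_py n = encode_four_chars_py_alt n
  have hr : PySem.List.pyRange 0 4 1 = [0, 1, 2, 3] := by decide
  simp only [encode_four_chars_py, encode_four_chars_py_alt, hr, List.foldl, pvBytesLE, List.map,
    pv_band_255, pv_band_mask32, Int.shiftRight_eq_div_pow,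
    PySem.Int.mod_eq_emod_of_pos (by norm_num : (0:Int) < 256),
    PySem.Int.floordiv_eq_ediv_of_pos (by norm_num : (0:Int) < 256)]
  norm_num
  have e1 : n / 256 % 256 = n % 4294967296 / 256 % 256 := by omega
  have e2 : n / 65536 % 256 = n % 4294967296 / 256 / 256 % 256 := by omega
  have e3 : n / 16777216 % 256 = n % 4294967296 / 256 / 256 / 256 % 256 := by omega
  rw [show (2:Int) ^ Int.toNat 8 = 256 from rfl, show (2:Int) ^ Int.toNat 16 = 65536 from rfl,
      show (2:Int) ^ Int.toNat 24 = 16777216 from rfl, e1, e2, e3]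
  apply String.toList_injective
  simp [String.toList_push]
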